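-- pv_equiv track=rewrite | github.com/Madhukar0006/automation-ai | vrl_error_handler.py | _fix_undefined_functions
-- ===== SOURCE A (Python) =====
-- def _fix_undefined_functions(vrl_code: str) -> str:
--     """Fix undefined functions"""
--     # Fix common typos
--     fixes = {
--         'parse_keyvalue': 'parse_key_value',
--         'parse_commonlog': 'parse_common_log',
--         'parse_apachelog': 'parse_apache_log',
--         'parse_nginxlog': 'parse_nginx_log'
--     }
--
--     fixed_code = vrl_code
--     for wrong, correct in fixes.items():
--         fixed_code = fixed_code.replace(wrong, correct)
--
--     return fixed_code
-- ===== SOURCE B (Python) =====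
-- def _fix_undefined_functions(vrl_code: str) -> str:
--     """Fix undefined functions (single left-to-right scan instead of four full replace passes)."""
--     fixes = {
--         'parse_keyvalue': 'parse_key_value',
--         'parse_commonlog': 'parse_common_log',
--         'parse_apachelog': 'parse_apache_log',
--         'parse_nginxlog': 'parse_nginx_log'
--     }
--     out = []
--     i = 0
--     n = len(vrl_code)
--     while i < n:
--         for wrong, correct in fixes.items():
--             if vrl_code.startswith(wrong, i):
--                 out.append(correct)
--                 i += len(wrong)
--                 break
--         else:
--             out.append(vrl_code[i])
--             i += 1
--     return ''.join(out)
-- ===== Notes on version B (the rewrite author's own statement) =====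
-- stated objective: alternative
-- what changed: B makes a single left-to-right scan of the string, matching the four wrong names at each position and emitting the fix, instead of A's four sequential full-string .replace() passes.
import Mathlib
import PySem

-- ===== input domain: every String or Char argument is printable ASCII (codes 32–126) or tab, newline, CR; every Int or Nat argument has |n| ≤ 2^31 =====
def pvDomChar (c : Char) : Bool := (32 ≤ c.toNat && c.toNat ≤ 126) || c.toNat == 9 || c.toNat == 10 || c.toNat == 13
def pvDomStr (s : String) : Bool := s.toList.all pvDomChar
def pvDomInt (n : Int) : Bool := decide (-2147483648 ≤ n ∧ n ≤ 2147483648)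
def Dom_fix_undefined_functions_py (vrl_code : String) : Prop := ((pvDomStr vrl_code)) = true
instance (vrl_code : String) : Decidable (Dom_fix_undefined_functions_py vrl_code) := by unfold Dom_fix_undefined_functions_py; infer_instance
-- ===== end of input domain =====

-- B replaces A's four sequential full-string replace passes by a single left-to-right scan; same result (alternative, not claimed faster).

-- ===== PORT A =====
-- literal port of A: iterate over the fixes dict, replacing each wrong name in turn
def fix_undefined_functions_py (vrl_code : String) : String :=
  let fixes : List (String × String) :=
    [("parse_keyvalue", "parse_key_value"),
     ("parse_commonlog", "parse_common_log"),
     ("parse_apachelog", "parse_apache_log"),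
     ("parse_nginxlog", "parse_nginx_log")]
  fixes.foldl (fun fixed_code wc => PySem.Str.replace fixed_code wc.1 wc.2) vrl_code

-- ===== PORT B =====
-- the four wrong names and their fixes, as char lists (Source B's fixes dict)
def pvK1 : List Char := ['p','a','r','s','e','_','k','e','y','v','a','l','u','e']
def pvR1 : List Char := ['p','a','r','s','e','_','k','e','y','_','v','a','l','u','e']
def pvK2 : List Char := ['p','a','r','s','e','_','c','o','m','m','o','n','l','o','g']
def pvR2 : List Char := ['p','a','r','s','e','_','c','o','m','m','o','n','_','l','o','g']
def pvK3 : List Char := ['p','a','r','s','e','_','a','p','a','c','h','e','l','o','g']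
def pvR3 : List Char := ['p','a','r','s','e','_','a','p','a','c','h','e','_','l','o','g']
def pvK4 : List Char := ['p','a','r','s','e','_','n','g','i','n','x','l','o','g']
def pvR4 : List Char := ['p','a','r','s','e','_','n','g','i','n','x','_','l','o','g']

-- Source B's single while-loop: at each position try the four wrong names in dict order;
-- on a match emit the fix and skip past the wrong name, else copy the char
def pvScanFix : List Char → List Char
  | [] => []
  | c :: t =>
    if pvK1.isPrefixOf (c :: t) then pvR1 ++ pvScanFix (t.drop (pvK1.length - 1))
    else if pvK2.isPrefixOf (c :: t) then pvR2 ++ pvScanFix (t.drop (pvK2.length - 1))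
    else if pvK3.isPrefixOf (c :: t) then pvR3 ++ pvScanFix (t.drop (pvK3.length - 1))
    else if pvK4.isPrefixOf (c :: t) then pvR4 ++ pvScanFix (t.drop (pvK4.length - 1))
    else c :: pvScanFix t
  termination_by l => l.length
  decreasing_by all_goals (simp only [List.length_cons, List.length_drop]; omega)

def fix_undefined_functions_py_alt (vrl_code : String) : String :=
  String.ofList (pvScanFix vrl_code.toList)

-- ===== PRECONDITION & SPEC =====
def Spec_fix_undefined_functions_py (vrl_code : String) (out : String) : Prop := out = fix_undefined_functions_py_alt vrl_code
instance (vrl_code : String) (out : String) : Decidable (Spec_fix_undefined_functions_py vrl_code out) := by unfold Spec_fix_undefined_functions_py; infer_instance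

-- ===== CLAIM (what is proved, stated in full; the proofs are below) =====
def Claim_equal_fix_undefined_functions_py : Prop := ∀ (vrl_code : String), Dom_fix_undefined_functions_py vrl_code → Spec_fix_undefined_functions_py vrl_code (fix_undefined_functions_py vrl_code)

-- ===== LEMMAS AND PROOFS =====

-- a plain (no accumulator, no fuel) form of Python's str.replace scan
def pvRep (old new : List Char) : List Char → List Char
  | [] => []
  | c :: t =>
    if old.isPrefixOf (c :: t) then new ++ pvRep old new (t.drop (old.length - 1))
    else c :: pvRep old new t
  termination_by l => l.length
  decreasing_by all_goals (simp only [List.length_cons, List.length_drop]; omega)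

lemma pvGo_eq (old new : List Char) (h : old ≠ []) :
    ∀ fuel l acc, l.length ≤ fuel →
      PySem.Chars.replace.go old new fuel l acc = acc.reverse ++ pvRep old new l := by
  intro fuel
  induction fuel with
  | zero =>
    intro l acc hl
    have hnil : l = [] := by cases l <;> simp_all
    subst hnil
    simp [PySem.Chars.replace.go, pvRep]
  | succ n ih =>
    intro l acc hl
    cases l with
    | nil => simp [PySem.Chars.replace.go, pvRep]
    | cons c t =>
      by_cases hp : old.isPrefixOf (c :: t)
      · have hol : 1 ≤ old.length := by cases old <;> simp_all
        have hdrop : List.drop old.length (c :: t) = t.drop (old.length - 1) := by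
          cases old with
          | nil => simp_all
          | cons o os => simp
        rw [PySem.Chars.replace.go]
        simp only [hp, if_true]
        rw [ih (List.drop old.length (c :: t)) (new.reverse ++ acc)
            (by simp at hl ⊢; omega)]
        rw [pvRep]
        simp [hp, hdrop]
      · rw [PySem.Chars.replace.go]
        simp only [hp, Bool.false_eq_true, if_false]
        rw [ih t (c :: acc) (by simp at hl ⊢; omega)]
        rw [pvRep]
        simp [hp]

lemma pvReplace_eq (old new s : List Char) (h : old ≠ []) :
    PySem.Chars.replace s old new = pvRep old new s := by
  rw [PySem.Chars.replace]
  have he : old.isEmpty = false := by cases old <;> simp_all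
  rw [he]
  simpa using pvGo_eq old new h s.length s [] (le_refl _)

-- at some index (within both lists) a and k disagree
def pvMismB (a k : List Char) : Bool :=
  (List.range (min a.length k.length)).any (fun j => a.getD j ' ' != k.getD j ' ')

-- no occurrence of k can start anywhere inside a, whatever follows a
def pvCleanB (a k : List Char) : Bool :=
  match a with
  | [] => true
  | _ :: a' => pvMismB a k && pvCleanB a' k

lemma pvMism_not_prefix {a k b : List Char} (h : pvMismB a k = true) : ¬ k <+: (a ++ b) := by
  intro hpre
  simp only [pvMismB, List.any_eq_true, List.mem_range, bne_iff_ne] at h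
  obtain ⟨j, hj, hne⟩ := h
  have hja : j < a.length := by omega
  have hjk : j < k.length := by omega
  have hjab : j < (a ++ b).length := by simp; omega
  have h1 : k[j] = (a ++ b)[j] := hpre.getElem hjk
  have h2 : (a ++ b)[j] = a[j] := List.getElem_append_left hja
  rw [List.getD_eq_getElem a ' ' hja, List.getD_eq_getElem k ' ' hjk] at hne
  exact hne (by rw [← h2, ← h1])

lemma pvAppendClean (k r : List Char) :
    ∀ a b, pvCleanB a k = true → pvRep k r (a ++ b) = a ++ pvRep k r b := by
  intro a
  induction a with
  | nil => intro b _; simp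
  | cons x a' ih =>
    intro b hc
    simp only [pvCleanB, Bool.and_eq_true] at hc
    have hnp : ¬ k.isPrefixOf (x :: (a' ++ b)) = true := by
      rw [List.isPrefixOf_iff_prefix]
      exact pvMism_not_prefix (a := x :: a') hc.1
    rw [List.cons_append, pvRep]
    simp only [Bool.not_eq_true] at hnp
    simp only [hnp, Bool.false_eq_true, if_false]
    rw [ih b hc.2]
    simp

lemma pvMatchPeel (k r b : List Char) (h : k ≠ []) :
    pvRep k r (k ++ b) = r ++ pvRep k r b := by
  cases k with
  | nil => exact absurd rfl h
  | cons c k' =>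
    rw [List.cons_append, pvRep]
    have hp : (c :: k').isPrefixOf (c :: (k' ++ b)) = true := by
      rw [List.isPrefixOf_iff_prefix]
      exact ⟨b, by simp⟩
    simp [hp]

-- every nonempty suffix of k0 disagrees with r within their overlap
def pvTailsClean (k0 r : List Char) : Bool :=
  k0.tails.all (fun t => t.isEmpty || pvMismB t r)

-- replacing k by r cannot create a new occurrence of (a suffix of) k0
lemma pvNoCreate (k r k0 : List Char) (h : pvTailsClean k0 r = true) :
    ∀ t s, s <:+ k0 → s <+: pvRep k r t → s <+: t := by
  intro t
  induction t with
  | nil =>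
    intro s _ hp
    rw [pvRep] at hp
    simpa using hp
  | cons d u ih =>
    intro s hs hp
    by_cases hk : k.isPrefixOf (d :: u)
    · rw [pvRep] at hp
      simp only [hk, if_true] at hp
      cases s with
      | nil => exact List.nil_prefix
      | cons e s' =>
        exfalso
        have hm : pvMismB (e :: s') r = true := by
          simp only [pvTailsClean, List.all_eq_true] at h
          have := h (e :: s') ((List.mem_tails _ _).mpr hs)
          simpa using this
        simp only [pvMismB, List.any_eq_true, List.mem_range, bne_iff_ne] at hm
        obtain ⟨j, hj, hne⟩ := hm
        have hjs : j < (e :: s').length := by omega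
        have hjr : j < r.length := by omega
        have hjr2 : j < (r ++ pvRep k r (u.drop (k.length - 1))).length := by simp; omega
        have h1 : (e :: s')[j] = (r ++ pvRep k r (u.drop (k.length - 1)))[j] :=
          hp.getElem hjs
        rw [List.getElem_append_left hjr] at h1
        rw [List.getD_eq_getElem _ ' ' hjs, List.getD_eq_getElem r ' ' hjr] at hne
        exact hne h1
    · rw [pvRep] at hp
      simp only [hk, Bool.false_eq_true, if_false] at hp
      cases s with
      | nil => exact List.nil_prefix
      | cons e s' =>
        obtain ⟨hde, hp'⟩ := (List.cons_prefix_cons).mp hp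
        have hs' : s' <:+ k0 := List.IsSuffix.trans ⟨[e], rfl⟩ hs
        exact List.cons_prefix_cons.mpr ⟨hde, ih s' hs' hp'⟩

-- abbreviations for A's four passes
def pvP1 : List Char → List Char := pvRep pvK1 pvR1
def pvP2 : List Char → List Char := pvRep pvK2 pvR2
def pvP3 : List Char → List Char := pvRep pvK3 pvR3
def pvP4 : List Char → List Char := pvRep pvK4 pvR4

-- peeling a full key match off B's scan
lemma pvScanPeel1 (u : List Char) : pvScanFix (pvK1 ++ u) = pvR1 ++ pvScanFix u := by
  have hp : pvK1.isPrefixOf (pvK1 ++ u) = true := by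
    rw [List.isPrefixOf_iff_prefix]; exact ⟨u, rfl⟩
  rw [show pvK1 ++ u = 'p' :: (pvK1.tail ++ u) from rfl, pvScanFix]
  rw [show ('p' :: (pvK1.tail ++ u)) = pvK1 ++ u from rfl]
  simp only [hp, if_true]
  rw [show (pvK1.tail ++ u).drop (pvK1.length - 1) = u from
    by rw [show pvK1.length - 1 = pvK1.tail.length from rfl]; exact List.drop_left]

lemma pvScanPeel2 (u : List Char) : pvScanFix (pvK2 ++ u) = pvR2 ++ pvScanFix u := by
  have hp : pvK2.isPrefixOf (pvK2 ++ u) = true := by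
    rw [List.isPrefixOf_iff_prefix]; exact ⟨u, rfl⟩
  have h1 : pvK1.isPrefixOf (pvK2 ++ u) = false := by
    rw [Bool.eq_false_iff, Ne, List.isPrefixOf_iff_prefix]
    exact pvMism_not_prefix (a := pvK2) (by decide)
  rw [show pvK2 ++ u = 'p' :: (pvK2.tail ++ u) from rfl, pvScanFix]
  rw [show ('p' :: (pvK2.tail ++ u)) = pvK2 ++ u from rfl]
  simp only [hp, h1, if_true, Bool.false_eq_true, if_false]
  rw [show (pvK2.tail ++ u).drop (pvK2.length - 1) = u from
    by rw [show pvK2.length - 1 = pvK2.tail.length from rfl]; exact List.drop_left]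

lemma pvScanPeel3 (u : List Char) : pvScanFix (pvK3 ++ u) = pvR3 ++ pvScanFix u := by
  have hp : pvK3.isPrefixOf (pvK3 ++ u) = true := by
    rw [List.isPrefixOf_iff_prefix]; exact ⟨u, rfl⟩
  have h1 : pvK1.isPrefixOf (pvK3 ++ u) = false := by
    rw [Bool.eq_false_iff, Ne, List.isPrefixOf_iff_prefix]
    exact pvMism_not_prefix (a := pvK3) (by decide)
  have h2 : pvK2.isPrefixOf (pvK3 ++ u) = false := by
    rw [Bool.eq_false_iff, Ne, List.isPrefixOf_iff_prefix]
    exact pvMism_not_prefix (a := pvK3) (by decide)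
  rw [show pvK3 ++ u = 'p' :: (pvK3.tail ++ u) from rfl, pvScanFix]
  rw [show ('p' :: (pvK3.tail ++ u)) = pvK3 ++ u from rfl]
  simp only [hp, h1, h2, if_true, Bool.false_eq_true, if_false]
  rw [show (pvK3.tail ++ u).drop (pvK3.length - 1) = u from
    by rw [show pvK3.length - 1 = pvK3.tail.length from rfl]; exact List.drop_left]

lemma pvScanPeel4 (u : List Char) : pvScanFix (pvK4 ++ u) = pvR4 ++ pvScanFix u := by
  have hp : pvK4.isPrefixOf (pvK4 ++ u) = true := by
    rw [List.isPrefixOf_iff_prefix]; exact ⟨u, rfl⟩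
  have h1 : pvK1.isPrefixOf (pvK4 ++ u) = false := by
    rw [Bool.eq_false_iff, Ne, List.isPrefixOf_iff_prefix]
    exact pvMism_not_prefix (a := pvK4) (by decide)
  have h2 : pvK2.isPrefixOf (pvK4 ++ u) = false := by
    rw [Bool.eq_false_iff, Ne, List.isPrefixOf_iff_prefix]
    exact pvMism_not_prefix (a := pvK4) (by decide)
  have h3 : pvK3.isPrefixOf (pvK4 ++ u) = false := by
    rw [Bool.eq_false_iff, Ne, List.isPrefixOf_iff_prefix]
    exact pvMism_not_prefix (a := pvK4) (by decide)
  rw [show pvK4 ++ u = 'p' :: (pvK4.tail ++ u) from rfl, pvScanFix]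
  rw [show ('p' :: (pvK4.tail ++ u)) = pvK4 ++ u from rfl]
  simp only [hp, h1, h2, h3, if_true, Bool.false_eq_true, if_false]
  rw [show (pvK4.tail ++ u).drop (pvK4.length - 1) = u from
    by rw [show pvK4.length - 1 = pvK4.tail.length from rfl]; exact List.drop_left]

-- the main invariant: the four sequential passes equal the single scan
lemma pvMainAux : ∀ n, ∀ t : List Char, t.length ≤ n →
    pvP4 (pvP3 (pvP2 (pvP1 t))) = pvScanFix t := by
  intro n
  induction n with
  | zero =>
    intro t ht
    have : t = [] := by cases t <;> simp_all
    subst this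
    simp [pvP1, pvP2, pvP3, pvP4, pvRep, pvScanFix]
  | succ n ih =>
    intro t ht
    by_cases hk1 : pvK1 <+: t
    · obtain ⟨u, rfl⟩ := hk1
      have hu : u.length ≤ n := by simp [pvK1] at ht ⊢; omega
      rw [show pvP1 (pvK1 ++ u) = pvR1 ++ pvP1 u from pvMatchPeel _ _ _ (by decide)]
      rw [show pvP2 (pvR1 ++ pvP1 u) = pvR1 ++ pvP2 (pvP1 u) from
        pvAppendClean pvK2 pvR2 pvR1 _ (by decide)]
      rw [show pvP3 (pvR1 ++ pvP2 (pvP1 u)) = pvR1 ++ pvP3 (pvP2 (pvP1 u)) from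
        pvAppendClean pvK3 pvR3 pvR1 _ (by decide)]
      rw [show pvP4 (pvR1 ++ pvP3 (pvP2 (pvP1 u))) = pvR1 ++ pvP4 (pvP3 (pvP2 (pvP1 u))) from
        pvAppendClean pvK4 pvR4 pvR1 _ (by decide)]
      rw [pvScanPeel1, ih u hu]
    · by_cases hk2 : pvK2 <+: t
      · obtain ⟨u, rfl⟩ := hk2
        have hu : u.length ≤ n := by simp [pvK2] at ht ⊢; omega
        rw [show pvP1 (pvK2 ++ u) = pvK2 ++ pvP1 u from
          pvAppendClean pvK1 pvR1 pvK2 _ (by decide)]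
        rw [show pvP2 (pvK2 ++ pvP1 u) = pvR2 ++ pvP2 (pvP1 u) from
          pvMatchPeel _ _ _ (by decide)]
        rw [show pvP3 (pvR2 ++ pvP2 (pvP1 u)) = pvR2 ++ pvP3 (pvP2 (pvP1 u)) from
          pvAppendClean pvK3 pvR3 pvR2 _ (by decide)]
        rw [show pvP4 (pvR2 ++ pvP3 (pvP2 (pvP1 u))) = pvR2 ++ pvP4 (pvP3 (pvP2 (pvP1 u))) from
          pvAppendClean pvK4 pvR4 pvR2 _ (by decide)]
        rw [pvScanPeel2, ih u hu]
      · by_cases hk3 : pvK3 <+: t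
        · obtain ⟨u, rfl⟩ := hk3
          have hu : u.length ≤ n := by simp [pvK3] at ht ⊢; omega
          rw [show pvP1 (pvK3 ++ u) = pvK3 ++ pvP1 u from
            pvAppendClean pvK1 pvR1 pvK3 _ (by decide)]
          rw [show pvP2 (pvK3 ++ pvP1 u) = pvK3 ++ pvP2 (pvP1 u) from
            pvAppendClean pvK2 pvR2 pvK3 _ (by decide)]
          rw [show pvP3 (pvK3 ++ pvP2 (pvP1 u)) = pvR3 ++ pvP3 (pvP2 (pvP1 u)) from
            pvMatchPeel _ _ _ (by decide)]
          rw [show pvP4 (pvR3 ++ pvP3 (pvP2 (pvP1 u))) = pvR3 ++ pvP4 (pvP3 (pvP2 (pvP1 u))) from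
            pvAppendClean pvK4 pvR4 pvR3 _ (by decide)]
          rw [pvScanPeel3, ih u hu]
        · by_cases hk4 : pvK4 <+: t
          · obtain ⟨u, rfl⟩ := hk4
            have hu : u.length ≤ n := by simp [pvK4] at ht ⊢; omega
            rw [show pvP1 (pvK4 ++ u) = pvK4 ++ pvP1 u from
              pvAppendClean pvK1 pvR1 pvK4 _ (by decide)]
            rw [show pvP2 (pvK4 ++ pvP1 u) = pvK4 ++ pvP2 (pvP1 u) from
              pvAppendClean pvK2 pvR2 pvK4 _ (by decide)]
            rw [show pvP3 (pvK4 ++ pvP2 (pvP1 u)) = pvK4 ++ pvP3 (pvP2 (pvP1 u)) from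
              pvAppendClean pvK3 pvR3 pvK4 _ (by decide)]
            rw [show pvP4 (pvK4 ++ pvP3 (pvP2 (pvP1 u))) = pvR4 ++ pvP4 (pvP3 (pvP2 (pvP1 u))) from
              pvMatchPeel _ _ _ (by decide)]
            rw [pvScanPeel4, ih u hu]
          · -- no key matches at the front: both sides keep the first char
            cases t with
            | nil =>
              simp [pvP1, pvP2, pvP3, pvP4, pvRep, pvScanFix]
            | cons c u =>
              have hu : u.length ≤ n := by simp at ht; omega
              have hb1 : pvK1.isPrefixOf (c :: u) = false := by
                rw [Bool.eq_false_iff, Ne, List.isPrefixOf_iff_prefix]; exact hk1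
              have hb2 : pvK2.isPrefixOf (c :: u) = false := by
                rw [Bool.eq_false_iff, Ne, List.isPrefixOf_iff_prefix]; exact hk2
              have hb3 : pvK3.isPrefixOf (c :: u) = false := by
                rw [Bool.eq_false_iff, Ne, List.isPrefixOf_iff_prefix]; exact hk3
              have hb4 : pvK4.isPrefixOf (c :: u) = false := by
                rw [Bool.eq_false_iff, Ne, List.isPrefixOf_iff_prefix]; exact hk4
              have e1 : pvP1 (c :: u) = c :: pvP1 u := by
                rw [pvP1, pvRep]; simp [hb1]
              have e2 : pvP2 (c :: pvP1 u) = c :: pvP2 (pvP1 u) := by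
                have : pvK2.isPrefixOf (c :: pvP1 u) = false := by
                  rw [Bool.eq_false_iff, Ne, List.isPrefixOf_iff_prefix]
                  intro hpre
                  rw [show pvK2 = 'p' :: pvK2.tail from rfl, List.cons_prefix_cons] at hpre
                  obtain ⟨hc, hp'⟩ := hpre
                  have := pvNoCreate pvK1 pvR1 pvK2 (by decide) u pvK2.tail ⟨['p'], rfl⟩ hp'
                  exact hk2 (by rw [show pvK2 = 'p' :: pvK2.tail from rfl, ← hc];
                                exact List.cons_prefix_cons.mpr ⟨rfl, this⟩)
                rw [pvP2, pvRep]; simp [this]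
              have e3 : pvP3 (c :: pvP2 (pvP1 u)) = c :: pvP3 (pvP2 (pvP1 u)) := by
                have : pvK3.isPrefixOf (c :: pvP2 (pvP1 u)) = false := by
                  rw [Bool.eq_false_iff, Ne, List.isPrefixOf_iff_prefix]
                  intro hpre
                  rw [show pvK3 = 'p' :: pvK3.tail from rfl, List.cons_prefix_cons] at hpre
                  obtain ⟨hc, hp'⟩ := hpre
                  have s2 := pvNoCreate pvK2 pvR2 pvK3 (by decide) (pvP1 u) pvK3.tail ⟨['p'], rfl⟩ hp'
                  have s1 := pvNoCreate pvK1 pvR1 pvK3 (by decide) u pvK3.tail ⟨['p'], rfl⟩ s2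
                  exact hk3 (by rw [show pvK3 = 'p' :: pvK3.tail from rfl, ← hc];
                                exact List.cons_prefix_cons.mpr ⟨rfl, s1⟩)
                rw [pvP3, pvRep]; simp [this]
              have e4 : pvP4 (c :: pvP3 (pvP2 (pvP1 u))) = c :: pvP4 (pvP3 (pvP2 (pvP1 u))) := by
                have : pvK4.isPrefixOf (c :: pvP3 (pvP2 (pvP1 u))) = false := by
                  rw [Bool.eq_false_iff, Ne, List.isPrefixOf_iff_prefix]
                  intro hpre
                  rw [show pvK4 = 'p' :: pvK4.tail from rfl, List.cons_prefix_cons] at hpre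
                  obtain ⟨hc, hp'⟩ := hpre
                  have s3 := pvNoCreate pvK3 pvR3 pvK4 (by decide) (pvP2 (pvP1 u)) pvK4.tail ⟨['p'], rfl⟩ hp'
                  have s2 := pvNoCreate pvK2 pvR2 pvK4 (by decide) (pvP1 u) pvK4.tail ⟨['p'], rfl⟩ s3
                  have s1 := pvNoCreate pvK1 pvR1 pvK4 (by decide) u pvK4.tail ⟨['p'], rfl⟩ s2
                  exact hk4 (by rw [show pvK4 = 'p' :: pvK4.tail from rfl, ← hc];
                                exact List.cons_prefix_cons.mpr ⟨rfl, s1⟩)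
                rw [pvP4, pvRep]; simp [this]
              rw [e1, e2, e3, e4, ih u hu, pvScanFix]
              simp [hb1, hb2, hb3, hb4]

-- ===== VERDICT (by name: the statement is the Claim_ definition above) =====
theorem fix_undefined_functions_py_spec : Claim_equal_fix_undefined_functions_py := by
  intro s _
  unfold Spec_fix_undefined_functions_py
  have hA : fix_undefined_functions_py s =
      PySem.Str.replace (PySem.Str.replace (PySem.Str.replace (PySem.Str.replace
        s "parse_keyvalue" "parse_key_value")
        "parse_commonlog" "parse_common_log")
        "parse_apachelog" "parse_apache_log")
        "parse_nginxlog" "parse_nginx_log" := rfl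
  rw [hA]
  unfold fix_undefined_functions_py_alt
  rw [PySem.Str.replace, PySem.Str.replace, PySem.Str.replace, PySem.Str.replace]
  simp only [String.toList_ofList]
  rw [show ("parse_keyvalue" : String).toList = pvK1 from rfl,
      show ("parse_key_value" : String).toList = pvR1 from rfl,
      show ("parse_commonlog" : String).toList = pvK2 from rfl,
      show ("parse_common_log" : String).toList = pvR2 from rfl,
      show ("parse_apachelog" : String).toList = pvK3 from rfl,
      show ("parse_apache_log" : String).toList = pvR3 from rfl,
      show ("parse_nginxlog" : String).toList = pvK4 from rfl,
      show ("parse_nginx_log" : String).toList = pvR4 from rfl]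
  rw [pvReplace_eq _ _ _ (by decide), pvReplace_eq _ _ _ (by decide),
      pvReplace_eq _ _ _ (by decide), pvReplace_eq _ _ _ (by decide)]
  exact congrArg String.ofList (pvMainAux s.toList.length s.toList (le_refl _))
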